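-- pv_equiv track=rewrite | github.com/zbalkan/arya | src/ast_observer.py | helper_rotate_ptrs
-- ===== SOURCE A (Python) =====
-- from typing import Any, Optional
--
-- def helper_rotate_ptrs(offsets : Any) -> list:
--     type(offsets)
--
--     offset_vars = [offset[0] for offset in offsets]
--     offset_vars = offset_vars[1:] + offset_vars[:1]
--     offsets_to_ret = []
--     for index, offset in enumerate(offsets):
--         offsets_to_ret.append((offset_vars[index],) + offset[1:4])
--
--     return offsets_to_ret
-- ===== SOURCE B (Python) =====
-- def helper_rotate_ptrs(offsets):
--     # Single streaming pass over an iterator: remember the head's first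
--     # component, emit each tuple's record as soon as its successor is seen,
--     # and close the cycle with the saved head value. No rotated list, no
--     # index arithmetic.
--     it = iter(offsets)
--     try:
--         first = next(it)
--     except StopIteration:
--         return []
--     result = []
--     prev = first
--     for cur in it:
--         result.append((cur[0],) + prev[1:4])
--         prev = cur
--     result.append((first[0],) + prev[1:4])
--     return result
-- ===== Notes on version B (the rewrite author's own statement) =====
-- stated objective: alternative
-- what changed: Instead of A's two staged passes (extract all first components, rotate that scalar list, then an enumerate loop doing indexed lookups), B makes one streaming pass over an iterator, threading the previous tuple and the saved head's first component: each record is emitted when its successor is seen and the cycle is closed at the end; no auxiliary list and no indexing at all.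
import Mathlib
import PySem

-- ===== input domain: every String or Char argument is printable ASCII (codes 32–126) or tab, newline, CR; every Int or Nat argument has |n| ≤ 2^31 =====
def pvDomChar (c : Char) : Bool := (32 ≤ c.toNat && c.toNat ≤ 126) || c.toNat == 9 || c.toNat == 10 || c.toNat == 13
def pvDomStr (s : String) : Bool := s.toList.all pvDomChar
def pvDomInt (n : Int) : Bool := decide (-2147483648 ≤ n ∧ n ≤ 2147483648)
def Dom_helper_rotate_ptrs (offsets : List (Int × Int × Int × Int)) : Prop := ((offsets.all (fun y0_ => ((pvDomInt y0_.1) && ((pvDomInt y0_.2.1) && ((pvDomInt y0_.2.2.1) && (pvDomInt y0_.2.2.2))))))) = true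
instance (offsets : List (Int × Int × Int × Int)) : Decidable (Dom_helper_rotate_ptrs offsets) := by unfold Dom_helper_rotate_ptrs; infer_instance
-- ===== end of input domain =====

-- B replaces A's staged extract-rotate-then-index passes by one streaming pass threading prev and the saved head value (alternative decomposition; return value proved equal).
-- ===== PORT A =====
-- A: extract first components, rotate that list by one, then append (rotated[index],) + offset[1:4] per enumerate step.
def helper_rotate_ptrs (offsets : List (Int × Int × Int × Int)) : List (Int × Int × Int × Int) :=
  let offset_vars := offsets.map (fun offset => offset.1)
  let offset_vars := PySem.List.slice offset_vars (some 1) none ++ PySem.List.slice offset_vars none (some 1)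
  let offsets_to_ret : List (Int × Int × Int × Int) := []
  let offsets_to_ret := (PySem.List.enumerate offsets 0).foldl
    (fun acc p =>
      -- offset_vars[index]: the enumerate counter, always in range (same length), so pyGetD is exact
      acc ++ [(PySem.List.pyGetD offset_vars p.1 0, p.2.2.1, p.2.2.2.1, p.2.2.2.2)]) offsets_to_ret
  offsets_to_ret

-- ===== PORT B =====
-- B: one streaming pass; the for-loop over the remaining iterator threads (result, prev) as a fold,
-- and the trailing append closes the cycle with the saved head's first component.
def helper_rotate_ptrs_alt (offsets : List (Int × Int × Int × Int)) : List (Int × Int × Int × Int) :=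
  match offsets with
  | [] => []                         -- next(it) raised StopIteration
  | first :: rest =>
    let st := rest.foldl
      (fun (st : List (Int × Int × Int × Int) × (Int × Int × Int × Int)) cur =>
        (st.1 ++ [(cur.1, st.2.2.1, st.2.2.2.1, st.2.2.2.2)], cur)) ([], first)
    st.1 ++ [(first.1, st.2.2.1, st.2.2.2.1, st.2.2.2.2)]

-- ===== PRECONDITION & SPEC =====
def Spec_helper_rotate_ptrs (offsets : List (Int × Int × Int × Int)) (out : List (Int × Int × Int × Int)) : Prop := out = helper_rotate_ptrs_alt offsets
instance (offsets : List (Int × Int × Int × Int)) (out : List (Int × Int × Int × Int)) : Decidable (Spec_helper_rotate_ptrs offsets out) := by unfold Spec_helper_rotate_ptrs; infer_instance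

-- ===== CLAIM (what is proved, stated in full; the proofs are below) =====
def Claim_equal_helper_rotate_ptrs : Prop := ∀ (offsets : List (Int × Int × Int × Int)), Dom_helper_rotate_ptrs offsets → Spec_helper_rotate_ptrs offsets (helper_rotate_ptrs offsets)

-- ===== LEMMAS AND PROOFS =====

-- proof-only recursive view of B's loop
def rotGo (firstv : Int) (prev : Int × Int × Int × Int) (rest : List (Int × Int × Int × Int)) :
    List (Int × Int × Int × Int) :=
  match rest with
  | [] => [(firstv, prev.2.1, prev.2.2.1, prev.2.2.2)]
  | cur :: rs => (cur.1, prev.2.1, prev.2.2.1, prev.2.2.2) :: rotGo firstv cur rs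

theorem loop_eq_rotGo (firstv : Int) :
    ∀ (rest : List (Int × Int × Int × Int)) (acc : List (Int × Int × Int × Int))
      (prev : Int × Int × Int × Int),
      (let st := rest.foldl
        (fun (st : List (Int × Int × Int × Int) × (Int × Int × Int × Int)) cur =>
          (st.1 ++ [(cur.1, st.2.2.1, st.2.2.2.1, st.2.2.2.2)], cur)) (acc, prev)
       st.1 ++ [(firstv, st.2.2.1, st.2.2.2.1, st.2.2.2.2)])
      = acc ++ rotGo firstv prev rest := by
  intro rest
  induction rest with
  | nil => intro acc prev; simp [rotGo]
  | cons cur rs ih =>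
    intro acc prev
    simp only [List.foldl_cons]
    rw [ih]
    simp [rotGo]

theorem rotGo_eq_zipWith (firstv : Int) :
    ∀ (rest : List (Int × Int × Int × Int)) (prev : Int × Int × Int × Int),
      rotGo firstv prev rest =
        List.zipWith (fun t v => ((v : Int), t.2.1, t.2.2.1, t.2.2.2))
          (prev :: rest) (rest.map Prod.fst ++ [firstv]) := by
  intro rest
  induction rest with
  | nil => intro prev; simp [rotGo]
  | cons cur rs ih => intro prev; simp [rotGo, ih cur]

theorem ports_agree (offsets : List (Int × Int × Int × Int)) :
    helper_rotate_ptrs offsets = helper_rotate_ptrs_alt offsets := by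
  rcases offsets with _ | ⟨x, xs⟩
  · decide
  · simp only [helper_rotate_ptrs, helper_rotate_ptrs_alt,
      PySem.List.foldl_append_singleton_eq_map, List.nil_append]
    rw [loop_eq_rotGo x.1 xs [] x, List.nil_append, rotGo_eq_zipWith]
    have hrot : PySem.List.slice ((x :: xs).map (fun offset => offset.1)) (some 1) none ++
        PySem.List.slice ((x :: xs).map (fun offset => offset.1)) none (some 1)
        = xs.map Prod.fst ++ [x.1] := by
      rw [PySem.List.slice_from_one,
        show ((1:Int)) = ((1:Nat):Int) from rfl, PySem.List.slice_to_natCast]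
      simp
    rw [hrot]
    apply List.ext_getElem
    · simp
    · intro i h1 h2
      have hi : i < (x :: xs).length := by simpa using h1
      simp only [List.getElem_map, PySem.List.getElem_enumerate, List.getElem_zipWith]
      have hidx : ((0:Int) + i) = ((i : Nat) : Int) := by ring
      rw [hidx, PySem.List.pyGetD_natCast]
      have hlen : i < (xs.map Prod.fst ++ [x.1]).length := by simpa using hi
      rw [List.getD_eq_getElem _ _ (by simpa using hlen)]

-- ===== VERDICT (by name: the statement is the Claim_ definition above) =====
theorem helper_rotate_ptrs_spec : Claim_equal_helper_rotate_ptrs := by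
  intro offsets _
  unfold Spec_helper_rotate_ptrs
  exact ports_agree offsets
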